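-- pv_equiv track=rewrite | github.com/wesleyd/aoc2024 | day12b.py | count_horizontals
-- ===== SOURCE A (Python) =====
-- def count_horizontals(horizontals):
--     horizontals = set(horizontals)
--     nsides = 0
--     while horizontals:
--         row, col = horizontals.pop()
--         i = 1
--         while (p := (row, col+i)) in horizontals:
--             horizontals.remove(p)
--             i += 1
--         i = 1
--         while (p := (row, col-i)) in horizontals:
--             horizontals.remove(p)
--             i += 1
--         nsides += 1
--     return nsides
-- ===== SOURCE B (Python) =====
-- def count_horizontals(horizontals):
--     s = set(horizontals)
--     return sum(1 for (r, c) in s if (r, c - 1) not in s)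
-- ===== Notes on version B (the rewrite author's own statement) =====
-- stated objective: simpler
-- what changed: Replaces the destructive flood-fill (pop a point, walk right and left removing the rest of its run) with a single pass counting the points whose left neighbor is absent, i.e. the left endpoints of maximal horizontal runs.
import Mathlib
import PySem

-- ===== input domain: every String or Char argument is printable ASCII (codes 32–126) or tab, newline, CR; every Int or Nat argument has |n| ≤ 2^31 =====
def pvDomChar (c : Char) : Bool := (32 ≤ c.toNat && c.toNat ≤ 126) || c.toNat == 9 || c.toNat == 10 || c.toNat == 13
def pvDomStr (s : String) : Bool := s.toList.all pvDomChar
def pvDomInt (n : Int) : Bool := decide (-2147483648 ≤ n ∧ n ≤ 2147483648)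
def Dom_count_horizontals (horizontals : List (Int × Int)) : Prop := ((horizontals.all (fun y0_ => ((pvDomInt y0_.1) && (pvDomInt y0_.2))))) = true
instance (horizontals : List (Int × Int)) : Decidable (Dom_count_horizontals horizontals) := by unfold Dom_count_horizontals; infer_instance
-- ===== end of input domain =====

-- B changes the algorithm (counts left run-endpoints in one pass instead of A's
-- destructive flood-fill); equivalence of RETURN VALUES is proved (A does not mutate
-- its argument: it rebinds the name to a fresh set).

-- ===== PORT A =====
-- inner `while (row, col+i) in horizontals: remove; i += 1` of A
theorem pvErase_lt {l : List (Int × Int)} {a : Int × Int} (h : a ∈ l) :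
    (l.erase a).length < l.length := by
  have := List.length_erase_of_mem h
  have : l.length ≠ 0 := by intro h0; simp [List.length_eq_zero_iff.mp h0] at h
  omega

def pvConsumeR (s : List (Int × Int)) (row col i : Int) : List (Int × Int) :=
  if h : (row, col + i) ∈ s then pvConsumeR (s.erase (row, col + i)) row col (i + 1) else s
termination_by s.length
decreasing_by exact pvErase_lt h

-- inner `while (row, col-i) in horizontals: remove; i += 1` of A
def pvConsumeL (s : List (Int × Int)) (row col i : Int) : List (Int × Int) :=
  if h : (row, col - i) ∈ s then pvConsumeL (s.erase (row, col - i)) row col (i + 1) else s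
termination_by s.length
decreasing_by exact pvErase_lt h

theorem pvConsumeR_length_le (s : List (Int × Int)) (row col i : Int) :
    (pvConsumeR s row col i).length ≤ s.length := by
  fun_induction pvConsumeR with
  | case1 =>
      rename_i h ih
      exact le_trans ih (le_of_lt (pvErase_lt h))
  | case2 => exact le_refl _

theorem pvConsumeL_length_le (s : List (Int × Int)) (row col i : Int) :
    (pvConsumeL s row col i).length ≤ s.length := by
  fun_induction pvConsumeL with
  | case1 =>
      rename_i h ih
      exact le_trans ih (le_of_lt (pvErase_lt h))
  | case2 => exact le_refl _

-- outer `while horizontals:` loop of A (pop, eat right, eat left, count one side)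
def pvLoopA : List (Int × Int) → Int → Int
  | [], nsides => nsides
  | (row, col) :: rest, nsides =>
      pvLoopA (pvConsumeL (pvConsumeR rest row col 1) row col 1) (nsides + 1)
termination_by s => s.length
decreasing_by
  exact Nat.lt_succ_of_le (le_trans (pvConsumeL_length_le _ _ _ _) (pvConsumeR_length_le _ _ _ _))

def count_horizontals (horizontals : List (Int × Int)) : Int :=
  pvLoopA (PySem.Set.ofList horizontals) 0

-- ===== PORT B =====
def count_horizontals_alt (horizontals : List (Int × Int)) : Int :=
  let s := PySem.Set.ofList horizontals
  ((s.filter (fun p => !decide ((p.1, p.2 - 1) ∈ s))).length : Int)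

-- ===== PRECONDITION & SPEC =====
def Spec_count_horizontals (horizontals : List (Int × Int)) (out : Int) : Prop := out = count_horizontals_alt horizontals
instance (horizontals : List (Int × Int)) (out : Int) : Decidable (Spec_count_horizontals horizontals out) := by unfold Spec_count_horizontals; infer_instance

-- ===== CLAIM (what is proved, stated in full; the proofs are below) =====
def Claim_equal_count_horizontals : Prop := ∀ (horizontals : List (Int × Int)), Dom_count_horizontals horizontals → Spec_count_horizontals horizontals (count_horizontals horizontals)

-- ===== LEMMAS AND PROOFS =====

-- number of "run starts": points whose left neighbor is absent
def pvStarts (s : List (Int × Int)) : Nat :=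
  s.countP (fun p => !decide ((p.1, p.2 - 1) ∈ s))

-- countP after changing the predicate at (at most) one point p0
theorem pvCountP_swap {l : List (Int × Int)} (hnd : l.Nodup) (p0 : Int × Int)
    (P Q : Int × Int → Bool) (hagree : ∀ a ∈ l, a ≠ p0 → P a = Q a) :
    l.countP P + (if p0 ∈ l ∧ Q p0 = true then 1 else 0)
      = l.countP Q + (if p0 ∈ l ∧ P p0 = true then 1 else 0) := by
  by_cases hm : p0 ∈ l
  · have hperm := List.perm_cons_erase hm
    have hP := hperm.countP_eq P
    have hQ := hperm.countP_eq Q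
    have hcong : (l.erase p0).countP P = (l.erase p0).countP Q := by
      apply List.countP_congr
      intro a ha
      have := (List.Nodup.mem_erase_iff hnd).mp ha
      rw [hagree a this.2 this.1]
    simp only [List.countP_cons] at hP hQ
    by_cases h1 : P p0 = true <;> by_cases h2 : Q p0 = true <;>
      simp [hm, h1, h2] at * <;> omega
  · have : l.countP P = l.countP Q := by
      apply List.countP_congr
      intro a ha
      rw [hagree a ha (by rintro rfl; exact hm ha)]
    simp [hm, this]

-- split one member off a countP
theorem pvCountP_mem_split {l : List (Int × Int)} {q : Int × Int}
    (hq : q ∈ l) (P : Int × Int → Bool) :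
    l.countP P = (if P q = true then 1 else 0) + (l.erase q).countP P := by
  have hperm := List.perm_cons_erase hq
  have := hperm.countP_eq P
  simp only [List.countP_cons] at this
  by_cases h : P q = true <;> simp [h] at * <;> omega

-- erasing a run element from the right: it was a start, its right neighbor becomes one
theorem pvStarts_erase_right {s : List (Int × Int)} (hnd : s.Nodup) {row c : Int}
    (hq : (row, c + 1) ∈ s) (hc : (row, c) ∉ s) :
    pvStarts (s.erase (row, c + 1)) + 1
      = pvStarts s + (if (row, c + 2) ∈ s then 1 else 0) := by
  set q : Int × Int := (row, c + 1) with hqdef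
  set P : Int × Int → Bool := fun p => !decide ((p.1, p.2 - 1) ∈ s) with hP
  set Q : Int × Int → Bool := fun p => !decide ((p.1, p.2 - 1) ∈ s.erase q) with hQ
  have hqe : q ∉ s.erase q := fun hmem => ((hnd.mem_erase_iff).mp hmem).1 rfl
  have hsplit : pvStarts s = 1 + (s.erase q).countP P := by
    have := pvCountP_mem_split hq P
    have hPq : P q = true := by
      simp only [hP, hqdef, show c + 1 - 1 = c from by ring]
      simpa using hc
    rw [pvStarts, ← hP, this, hPq]
    simp
  have hswap := pvCountP_swap (hnd.erase q) (row, c + 2) P Q (by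
    intro a ha hne
    have hne' : (a.1, a.2 - 1) ≠ q := by
      intro he
      apply hne
      have h1 : a.1 = row := congrArg Prod.fst he
      have h2 : a.2 - 1 = c + 1 := congrArg Prod.snd he
      have : a.2 = c + 2 := by omega
      exact Prod.ext h1 this
    simp only [hP, hQ]
    exact congrArg (!·) (decide_eq_decide.mpr (List.mem_erase_of_ne hne').symm))
  have hPp0 : P (row, c + 2) = false := by
    simp only [hP, show c + 2 - 1 = c + 1 from by ring]
    simpa [hqdef] using hq
  have hQp0 : Q (row, c + 2) = true := by
    simp only [hQ, show c + 2 - 1 = c + 1 from by ring]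
    simpa [hqdef] using hqe
  have hmem0 : (row, c + 2) ∈ s.erase q ↔ (row, c + 2) ∈ s := by
    apply List.mem_erase_of_ne
    intro he
    have h2 := congrArg Prod.snd he
    simp only [hqdef] at h2
    omega
  have hstarts_erase : pvStarts (s.erase q) = (s.erase q).countP Q := rfl
  simp only [hPp0, hQp0, Bool.false_eq_true, and_true, and_false, if_false,
    Nat.add_zero] at hswap
  by_cases hm : (row, c + 2) ∈ s
  · rw [if_pos hm]
    rw [if_pos (hmem0.mpr hm)] at hswap
    rw [hsplit, hstarts_erase]
    omega
  · rw [if_neg hm]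
    rw [if_neg (fun h => hm (hmem0.mp h))] at hswap
    rw [hsplit, hstarts_erase]
    omega

-- erasing a run element from the left
theorem pvStarts_erase_left {s : List (Int × Int)} (_hnd : s.Nodup) {row c : Int}
    (hq : (row, c - 1) ∈ s) (hc : (row, c) ∉ s) :
    pvStarts (s.erase (row, c - 1)) + 1
      = pvStarts s + (if (row, c - 2) ∈ s then 1 else 0) := by
  set q : Int × Int := (row, c - 1) with hqdef
  set P : Int × Int → Bool := fun p => !decide ((p.1, p.2 - 1) ∈ s) with hP
  set Q : Int × Int → Bool := fun p => !decide ((p.1, p.2 - 1) ∈ s.erase q) with hQ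
  have hsplit := pvCountP_mem_split hq P
  have hcong : (s.erase q).countP P = (s.erase q).countP Q := by
    apply List.countP_congr
    intro a ha
    have hne' : (a.1, a.2 - 1) ≠ q := by
      intro he
      have h1 := congrArg Prod.fst he
      have h2 := congrArg Prod.snd he
      simp only [hqdef] at h1 h2
      have haeq : a = (row, c) := Prod.ext h1 (by omega)
      exact hc (haeq ▸ List.mem_of_mem_erase ha)
    have hPQ : P a = Q a := by
      simp only [hP, hQ]
      exact congrArg (!·) (decide_eq_decide.mpr (List.mem_erase_of_ne hne').symm)
    rw [hPQ]
  have hPq : P q = !decide ((row, c - 2) ∈ s) := by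
    simp only [hP, hqdef, show c - 1 - 1 = c - 2 from by ring]
  have hse : pvStarts (s.erase q) = (s.erase q).countP Q := rfl
  have hs0 : pvStarts s = List.countP P s := rfl
  rw [hse, hs0, hsplit, hPq, hcong]
  by_cases hm : (row, c - 2) ∈ s
  · simp [hm]
  · simp [hm]
    omega

-- popping the head point
theorem pvStarts_cons {rest : List (Int × Int)} {row col : Int}
    (hnd : ((row, col) :: rest).Nodup) :
    pvStarts ((row, col) :: rest) + (if (row, col + 1) ∈ rest then 1 else 0)
      + (if (row, col - 1) ∈ rest then 1 else 0) = pvStarts rest + 1 := by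
  rw [List.nodup_cons] at hnd
  obtain ⟨hq, hrest⟩ := hnd
  set P : Int × Int → Bool := fun p => !decide ((p.1, p.2 - 1) ∈ (row, col) :: rest) with hP
  set Q : Int × Int → Bool := fun p => !decide ((p.1, p.2 - 1) ∈ rest) with hQ
  have hmc : ∀ p : Int × Int, p ≠ (row, col) → (p ∈ (row, col) :: rest ↔ p ∈ rest) := by
    intro p hp
    constructor
    · intro h
      rcases List.mem_cons.mp h with he | h
      · exact absurd he hp
      · exact h
    · exact fun h => List.mem_cons_of_mem _ h
  have hswap := pvCountP_swap hrest (row, col + 1) P Q (by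
    intro a ha hne
    have hne' : (a.1, a.2 - 1) ≠ (row, col) := by
      intro he
      have h1 := congrArg Prod.fst he
      have h2 := congrArg Prod.snd he
      simp only [] at h1 h2
      exact hne (Prod.ext h1 (by omega))
    simp only [hP, hQ]
    exact congrArg (!·) (decide_eq_decide.mpr (hmc _ hne')))
  have hPhead : P (row, col) = !decide ((row, col - 1) ∈ rest) := by
    simp only [hP]
    exact congrArg (!·) (decide_eq_decide.mpr (hmc (row, col - 1) (by
      intro he
      have h2 := congrArg Prod.snd he
      simp only [] at h2
      omega)))
  have hPp0 : P (row, col + 1) = false := by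
    simp only [hP, show col + 1 - 1 = col from by ring]
    simp [List.mem_cons]
  have hQp0 : Q (row, col + 1) = true := by
    simp only [hQ, show col + 1 - 1 = col from by ring]
    simpa using hq
  have hcons : pvStarts ((row, col) :: rest)
      = List.countP P rest + (if P (row, col) = true then 1 else 0) := by
    rw [pvStarts, ← hP, List.countP_cons]
  have hr : pvStarts rest = List.countP Q rest := rfl
  simp only [hPp0, hQp0, Bool.false_eq_true, and_true, and_false, if_false,
    Nat.add_zero] at hswap
  rw [hcons, hPhead, hr]
  by_cases hm1 : (row, col + 1) ∈ rest <;> by_cases hm2 : (row, col - 1) ∈ rest <;>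
    simp [hm1, hm2] at hswap ⊢ <;> omega

theorem pvConsumeR_sublist (s : List (Int × Int)) (row col i : Int) :
    (pvConsumeR s row col i).Sublist s := by
  fun_induction pvConsumeR with
  | case1 =>
      rename_i h ih
      exact ih.trans (List.erase_sublist ..)
  | case2 => exact List.Sublist.refl _

theorem pvConsumeL_sublist (s : List (Int × Int)) (row col i : Int) :
    (pvConsumeL s row col i).Sublist s := by
  fun_induction pvConsumeL with
  | case1 =>
      rename_i h ih
      exact ih.trans (List.erase_sublist ..)
  | case2 => exact List.Sublist.refl _

-- consumeR only touches points (row, col+j) with j ≥ i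
theorem pvConsumeR_mem (s : List (Int × Int)) (row col i : Int) (p : Int × Int) :
    p.1 ≠ row ∨ p.2 < col + i → (p ∈ pvConsumeR s row col i ↔ p ∈ s) := by
  fun_induction pvConsumeR with
  | case1 =>
      rename_i s i h ih
      intro hp
      have hne : p ≠ (row, col + i) := by
        rintro rfl
        rcases hp with hp | hp
        · exact hp rfl
        · omega
      rw [ih (by rcases hp with hp | hp; exact Or.inl hp; exact Or.inr (by omega))]
      exact List.mem_erase_of_ne hne
  | case2 => intro _; exact Iff.rfl

theorem pvConsumeR_starts (s : List (Int × Int)) (row col i : Int) :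
    s.Nodup → (row, col + i - 1) ∉ s →
    pvStarts (pvConsumeR s row col i) + (if (row, col + i) ∈ s then 1 else 0)
      = pvStarts s := by
  fun_induction pvConsumeR with
  | case1 =>
      rename_i s i h ih
      intro hnd hout
      rw [if_pos h]
      have e1 : col + (i + 1) - 1 = col + i := by ring
      have e2 : col + i - 1 + 1 = col + i := by ring
      have e3 : col + i - 1 + 2 = col + i + 1 := by ring
      have e4 : col + (i + 1) = col + i + 1 := by ring
      have hq' : (row, col + (i + 1) - 1) ∉ s.erase (row, col + i) := by
        rw [e1]
        exact fun hm => ((hnd.mem_erase_iff).mp hm).1 rfl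
      have ihh := ih (hnd.erase _) hq'
      rw [e4] at ihh
      have her := pvStarts_erase_right hnd (row := row) (c := col + i - 1)
        (by rw [e2]; exact h) hout
      rw [e2, e3] at her
      have hmm : (row, col + i + 1) ∈ s.erase (row, col + i) ↔ (row, col + i + 1) ∈ s := by
        apply List.mem_erase_of_ne
        intro he
        have h2 := congrArg Prod.snd he
        simp only [] at h2
        omega
      by_cases hm : (row, col + i + 1) ∈ s
      · rw [if_pos (hmm.mpr hm)] at ihh
        rw [if_pos hm] at her
        omega
      · rw [if_neg (fun hx => hm (hmm.mp hx))] at ihh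
        rw [if_neg hm] at her
        omega
  | case2 =>
      rename_i s i h
      intro _ _
      rw [if_neg h]
      omega

theorem pvConsumeL_starts (s : List (Int × Int)) (row col i : Int) :
    s.Nodup → (row, col - i + 1) ∉ s →
    pvStarts (pvConsumeL s row col i) + (if (row, col - i) ∈ s then 1 else 0)
      = pvStarts s := by
  fun_induction pvConsumeL with
  | case1 =>
      rename_i s i h ih
      intro hnd hout
      rw [if_pos h]
      have e1 : col - (i + 1) + 1 = col - i := by ring
      have e2 : col - i + 1 - 1 = col - i := by ring
      have e3 : col - i + 1 - 2 = col - i - 1 := by ring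
      have e4 : col - (i + 1) = col - i - 1 := by ring
      have hq' : (row, col - (i + 1) + 1) ∉ s.erase (row, col - i) := by
        rw [e1]
        exact fun hm => ((hnd.mem_erase_iff).mp hm).1 rfl
      have ihh := ih (hnd.erase _) hq'
      rw [e4] at ihh
      have her := pvStarts_erase_left hnd (row := row) (c := col - i + 1)
        (by rw [e2]; exact h) hout
      rw [e2, e3] at her
      have hmm : (row, col - i - 1) ∈ s.erase (row, col - i) ↔ (row, col - i - 1) ∈ s := by
        apply List.mem_erase_of_ne
        intro he
        have h2 := congrArg Prod.snd he
        simp only [] at h2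
        omega
      by_cases hm : (row, col - i - 1) ∈ s
      · rw [if_pos (hmm.mpr hm)] at ihh
        rw [if_pos hm] at her
        omega
      · rw [if_neg (fun hx => hm (hmm.mp hx))] at ihh
        rw [if_neg hm] at her
        omega
  | case2 =>
      rename_i s i h
      intro _ _
      rw [if_neg h]
      omega

theorem pvLoopA_eq (s : List (Int × Int)) (n : Int) :
    s.Nodup → pvLoopA s n = n + pvStarts s := by
  fun_induction pvLoopA with
  | case1 =>
      intro _
      simp [pvStarts]
  | case2 =>
      rename_i row col rest n ih
      intro hnd
      have hnd' := hnd
      rw [List.nodup_cons] at hnd'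
      obtain ⟨hq, hrest⟩ := hnd'
      set s1 := pvConsumeR rest row col 1 with hs1
      have hnd1 : s1.Nodup := (pvConsumeR_sublist rest row col 1).nodup hrest
      have hout1 : (row, col + 1 - 1) ∉ rest := by
        rw [show col + 1 - 1 = col from by ring]; exact hq
      have E1 := pvConsumeR_starts rest row col 1 hrest hout1
      rw [← hs1] at E1
      have hcolnot : (row, col) ∉ s1 := fun hx =>
        hq ((pvConsumeR_mem rest row col 1 (row, col) (Or.inr (by simp))).mp hx)
      have hout2 : (row, col - 1 + 1) ∉ s1 := by
        rw [show col - 1 + 1 = col from by ring]; exact hcolnot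
      have E2 := pvConsumeL_starts s1 row col 1 hnd1 hout2
      have M : (row, col - 1) ∈ s1 ↔ (row, col - 1) ∈ rest :=
        pvConsumeR_mem rest row col 1 (row, col - 1) (Or.inr (by simp))
      have C := pvStarts_cons (rest := rest) (row := row) (col := col) hnd
      have hnd2 : (pvConsumeL s1 row col 1).Nodup := (pvConsumeL_sublist s1 row col 1).nodup hnd1
      rw [ih hnd2]
      have E2' : pvStarts (pvConsumeL s1 row col 1) + (if (row, col - 1) ∈ rest then 1 else 0)
          = pvStarts s1 := by
        rw [← E2]
        congr 1
        exact if_congr M.symm rfl rfl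
      by_cases hm1 : (row, col + 1) ∈ rest <;> by_cases hm2 : (row, col - 1) ∈ rest
      all_goals simp only [hm1, hm2, if_true, if_false] at E1 E2' C
      all_goals omega

-- ===== VERDICT (by name: the statement is the Claim_ definition above) =====
theorem count_horizontals_spec : Claim_equal_count_horizontals := by
  intro hs _
  unfold Spec_count_horizontals count_horizontals count_horizontals_alt
  rw [pvLoopA_eq _ _ (PySem.Set.nodup_ofList hs)]
  simp [pvStarts, List.countP_eq_length_filter]
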